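-- pv_equiv track=rewrite | github.com/esavv/leetcode | problems/0216_combination_sum_iii.py | soln3
-- ===== SOURCE A (Python) =====
-- def soln3(k, n):
--     combos = []
--
--     def backtrack(n, k, nums, combo):
--         if n == 0 and k == 0:
--             combos.append(combo)
--             return
--
--         if n < 1:
--             return
--
--         for number in range(nums, 0, -1):
--             new_combo = combo[:]
--             new_combo.append(number)
--             backtrack(n - number, k - 1, number-1, new_combo)
--         return
--
--     backtrack(n, k, 9, [])
--     return combos
-- ===== SOURCE B (Python) =====
-- def soln3(k, n):
--     res = []
--     for mask in range(511, -1, -1):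
--         combo = [d for d in range(9, 0, -1) if (mask >> (d - 1)) & 1]
--         if len(combo) == k and sum(combo) == n:
--             res.append(combo)
--     return res
-- ===== Notes on version B (the rewrite author's own statement) =====
-- stated objective: alternative
-- what changed: Replaced A's recursive pruned backtracking over remaining sum/count with a flat generate-and-filter: iterate the 512 bitmask subsets of digits 1-9 in descending mask order (which reproduces A's DFS enumeration order) and keep those with the required length and sum.
import Mathlib
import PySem

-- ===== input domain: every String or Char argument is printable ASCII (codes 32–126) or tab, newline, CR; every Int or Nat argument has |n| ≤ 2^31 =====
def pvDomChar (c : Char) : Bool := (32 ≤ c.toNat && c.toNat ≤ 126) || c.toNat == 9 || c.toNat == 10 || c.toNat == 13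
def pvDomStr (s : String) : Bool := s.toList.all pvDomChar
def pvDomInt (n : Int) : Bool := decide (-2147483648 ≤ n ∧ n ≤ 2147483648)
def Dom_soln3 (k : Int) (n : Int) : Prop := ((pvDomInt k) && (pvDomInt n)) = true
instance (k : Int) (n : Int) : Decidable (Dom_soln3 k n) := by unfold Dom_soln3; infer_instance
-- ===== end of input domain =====

-- B replaces A's pruned recursive backtracking by a flat generate-and-filter over all 512 bitmask
-- subsets of the digits 1..9 (objective: alternative algorithm, similar cost).

-- ===== PORT A =====
-- Python's inner `backtrack` with its `for number in range(nums, 0, -1)` loop; `combos` is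
-- threaded as an accumulator (the Python mutates the closed-over list).  `backtrack`'s body is
-- inlined once into the loop so that the mutual recursion becomes structural on the counter:
-- `loopA number n k combo combos` runs the loop iterations number, number-1, ..., 1, and each
-- iteration performs backtrack's three steps (append check, n<1 prune, inner loop) verbatim.
def loopA : Nat → Int → Int → List Int → List (List Int) → List (List Int)
  | 0, _, _, _, combos => combos
  | m + 1, n, k, combo, combos =>
      let number : Int := (m : Int) + 1
      let n' := n - number
      let k' := k - 1
      let new_combo := combo ++ [number]
      let combos' :=
        if n' = 0 ∧ k' = 0 then combos ++ [new_combo]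
        else if n' < 1 then combos
        else loopA m n' k' new_combo combos
      loopA m n k combo combos'

-- the top-level call backtrack(n, k, 9, [])
def btA (n : Int) (k : Int) (nums : Nat) (combo : List Int) (combos : List (List Int)) :
    List (List Int) :=
  if n = 0 ∧ k = 0 then combos ++ [combo]
  else if n < 1 then combos
  else loopA nums n k combo combos

def soln3 (k : Int) (n : Int) : List (List Int) := btA n k 9 [] []

-- ===== PORT B =====
def soln3_alt (k : Int) (n : Int) : List (List Int) :=
  (List.range 512).foldl (fun res i =>
    let mask : Nat := 511 - i
    let combo := (PySem.List.pyRange 9 0 (-1)).filter (fun d => Nat.testBit mask (d - 1).toNat)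
    if (combo.length : Int) = k ∧ combo.sum = n then res ++ [combo] else res) []

-- ===== PRECONDITION & SPEC =====
def Spec_soln3 (k : Int) (n : Int) (out : List (List Int)) : Prop := out = soln3_alt k n
instance (k : Int) (n : Int) (out : List (List Int)) : Decidable (Spec_soln3 k n out) := by unfold Spec_soln3; infer_instance

-- ===== CLAIM (what is proved, stated in full; the proofs are below) =====
def Claim_equal_soln3 : Prop := ∀ (k : Int) (n : Int), Dom_soln3 k n → Spec_soln3 k n (soln3 k n)

-- ===== LEMMAS AND PROOFS =====

-- The subsets of {1..9} both programs enumerate, in their shared order: for A, the DFS order of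
-- the pruned backtracking (largest digit first); for B, descending bitmask order.
def subsA : Nat → List (List Int)
  | 0 => [[]]
  | m + 1 => (subsA m).map (fun s => ((m : Int) + 1) :: s) ++ subsA m

def pKN (k n : Int) (s : List Int) : Bool := decide ((s.length : Int) = k ∧ s.sum = n)

def comboOf (i : Nat) : List Int :=
  (PySem.List.pyRange 9 0 (-1)).filter (fun d => Nat.testBit (511 - i) (d - 1).toNat)

theorem subsA_pos : ∀ (N : Nat), ∀ s ∈ subsA N, ∀ x ∈ s, (1 : Int) ≤ x := by
  intro N
  induction N with
  | zero => intro s hs x hx; simp [subsA] at hs; simp [hs] at hx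
  | succ m ih =>
      intro s hs x hx
      simp only [subsA, List.mem_append, List.mem_map] at hs
      rcases hs with ⟨t, ht, rfl⟩ | hs
      · rcases List.mem_cons.mp hx with rfl | hx
        · omega
        · exact ih t ht x hx
      · exact ih s hs x hx

theorem sum_lb (s : List Int) (h : ∀ x ∈ s, (1 : Int) ≤ x) :
    0 ≤ s.sum ∧ (s ≠ [] → 1 ≤ s.sum) := by
  induction s with
  | nil => simp
  | cons a t ih =>
      have ha := h a (by simp)
      have ht := ih (fun x hx => h x (by simp [hx]))
      simp only [List.sum_cons]
      constructor <;> intros <;> omega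

theorem filter_zero : ∀ (N : Nat), (subsA N).filter (pKN 0 0) = [[]] := by
  intro N
  induction N with
  | zero => simp [subsA, pKN]
  | succ m ih =>
      have hmap : ((subsA m).map (fun s => ((m : Int) + 1) :: s)).filter (pKN 0 0) = [] := by
        refine List.filter_eq_nil_iff.mpr ?_
        intro a ha
        rcases List.mem_map.mp ha with ⟨t, _, rfl⟩
        simp [pKN]
        omega
      simp [subsA, List.filter_append, hmap, ih]

theorem filter_neg (N : Nat) (k n : Int) (hn : n < 1) (h0 : ¬ (n = 0 ∧ k = 0)) :
    (subsA N).filter (pKN k n) = [] := by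
  refine List.filter_eq_nil_iff.mpr ?_
  intro s hs
  have hpos := subsA_pos N s hs
  have hlb := sum_lb s hpos
  simp only [pKN, decide_eq_true_eq, not_and]
  intro hlen hsum
  rcases s with _ | ⟨a, t⟩
  · simp at hlen hsum; omega
  · have := hlb.2 (by simp)
    omega

theorem loop_spec : ∀ (N : Nat) (n k : Int) (combo : List Int) (combos : List (List Int)),
    1 ≤ n →
    loopA N n k combo combos = combos ++ ((subsA N).filter (pKN k n)).map (fun s => combo ++ s) := by
  intro N
  induction N with
  | zero =>
      intro n k combo combos hn
      have : (subsA 0).filter (pKN k n) = [] := by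
        simp [subsA, pKN]; omega
      simp [loopA, this]
  | succ m ih =>
      intro n k combo combos hn
      have hfilter :
          (subsA (m + 1)).filter (pKN k n)
            = ((subsA m).filter (pKN (k - 1) (n - ((m : Int) + 1)))).map
                (fun s => ((m : Int) + 1) :: s)
              ++ (subsA m).filter (pKN k n) := by
        have hcomp : ((subsA m).map (fun s => ((m : Int) + 1) :: s)).filter (pKN k n)
            = ((subsA m).filter (pKN (k - 1) (n - ((m : Int) + 1)))).map
                (fun s => ((m : Int) + 1) :: s) := by
          rw [List.filter_map]
          congr 1
          refine List.filter_congr ?_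
          intro s _
          simp only [Function.comp, pKN, decide_eq_decide, List.length_cons, List.sum_cons]
          push_cast
          constructor <;> rintro ⟨h1, h2⟩ <;> constructor <;> omega
        simp [subsA, List.filter_append, hcomp]
      have hmapmap :
          (((subsA m).filter (pKN (k - 1) (n - ((m : Int) + 1)))).map
              (fun s => ((m : Int) + 1) :: s)).map (fun s => combo ++ s)
            = ((subsA m).filter (pKN (k - 1) (n - ((m : Int) + 1)))).map
                (fun s => (combo ++ [(m : Int) + 1]) ++ s) := by
        rw [List.map_map]
        refine List.map_congr_left ?_
        intro s _
        simp only [Function.comp]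
        exact List.append_cons ..
      have hcombos' :
          (if n - ((m : Int) + 1) = 0 ∧ k - 1 = 0 then combos ++ [combo ++ [(m : Int) + 1]]
           else if n - ((m : Int) + 1) < 1 then combos
           else loopA m (n - ((m : Int) + 1)) (k - 1) (combo ++ [(m : Int) + 1]) combos)
            = combos ++ ((subsA m).filter (pKN (k - 1) (n - ((m : Int) + 1)))).map
                (fun s => (combo ++ [(m : Int) + 1]) ++ s) := by
        split_ifs with h1 h2
        · rw [h1.1, h1.2, filter_zero]; simp
        · rw [filter_neg m (k - 1) (n - ((m : Int) + 1)) h2 h1]; simp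
        · exact ih (n - ((m : Int) + 1)) (k - 1) (combo ++ [(m : Int) + 1]) combos (by omega)
      show loopA m n k combo _ = _
      rw [ih n k combo _ hn, hcombos', hfilter]
      simp [List.map_append, hmapmap, List.append_assoc]

theorem bt_spec (n k : Int) (combo : List Int) (combos : List (List Int)) :
    btA n k 9 combo combos = combos ++ ((subsA 9).filter (pKN k n)).map (fun s => combo ++ s) := by
  unfold btA
  split_ifs with h1 h2
  · rw [h1.1, h1.2, filter_zero]; simp
  · rw [filter_neg 9 k n h2 h1]; simp
  · exact loop_spec 9 n k combo combos (by omega)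

set_option maxRecDepth 100000 in
theorem maps_eq : (List.range 512).map comboOf = subsA 9 := by decide

theorem alt_spec (k n : Int) : soln3_alt k n = (subsA 9).filter (pKN k n) := by
  show (List.range 512).foldl
      (fun res i => if ((comboOf i).length : Int) = k ∧ (comboOf i).sum = n
                    then res ++ [comboOf i] else res) [] = _
  rw [← List.foldl_map (f := comboOf)
        (g := fun res c => if (c.length : Int) = k ∧ c.sum = n then res ++ [c] else res), maps_eq,
      PySem.List.foldl_append_ite_eq_filter]
  refine List.filter_congr ?_
  intro x _
  simp [pKN]

-- ===== VERDICT (by name: the statement is the Claim_ definition above) =====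
theorem soln3_spec : Claim_equal_soln3 := by
  intro k n _
  show soln3 k n = soln3_alt k n
  rw [alt_spec]
  unfold soln3
  rw [bt_spec]
  simp
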